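-- pv_equiv track=rewrite | github.com/HibernalGlow/MineruCustom | src/tool/footnotes2mineru.py | merge_continuous_blocks
-- ===== SOURCE A (Python) =====
-- def merge_continuous_blocks(markdown_text):
--     """合并连续的脚注代码块"""
--     # 分割成行
--     lines = markdown_text.split('\n')
--     result_lines = []
--     current_block = []
--     in_block = False
--     block_type = None  # 用于区分footnote和page块
--
--     i = 0
--     while i < len(lines):
--         line = lines[i]
--
--         # 检测代码块开始
--         if line.strip() in ['```footnote', '```page']:
--             block_type = 'footnote' if line.strip() == '```footnote' else 'page'
--             if not in_block:
--                 # 新代码块开始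
--                 in_block = True
--                 current_block = [line]
--             else:
--                 # 连续的代码块，跳过开始标记
--                 pass
--         # 检测代码块结束
--         elif line.strip() == '```':
--             if in_block:
--                 if block_type == 'footnote':
--                     # 检查后面是否有连续的脚注块（允许中间有4行以内的空行）
--                     next_block_start = -1
--                     empty_lines = 0
--                     j = i + 1
--                     while j < min(i + 6, len(lines)):  # 最多往后看5行（4行空行+1行代码块开始）
--                         if lines[j].strip() == '```footnote':
--                             next_block_start = j
--                             break
--                         elif not lines[j].strip():
--                             empty_lines += 1
--                         elif lines[j].strip() == '```page':  # 如果遇到page块，不合并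
--                             break
--                         else:
--                             break
--                         j += 1
--
--                     if next_block_start != -1 and empty_lines <= 4:
--                         # 跳过结束标记和空行，继续收集下一个块的内容
--                         i = next_block_start
--                     else:
--                         # 添加结束标记并结束当前块
--                         current_block.append(line)
--                         result_lines.extend(current_block)
--                         current_block = []
--                         in_block = False
--                 else:
--                     # page块直接结束
--                     current_block.append(line)
--                     result_lines.extend(current_block)
--                     current_block = []
--                     in_block = False
--             else:
--                 result_lines.append(line)
--         else:
--             if in_block:
--                 if line.strip():  # 只添加非空行
--                     current_block.append(line)
--             else:
--                 result_lines.append(line)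
--         i += 1
--
--     # 如果还有未处理的块
--     if current_block:
--         result_lines.extend(current_block)
--
--     return '\n'.join(result_lines)
-- ===== SOURCE B (Python) =====
-- def merge_continuous_blocks(markdown_text):
--     """合并连续的脚注代码块（单遍状态机：延迟冲刷代替向前窥视）"""
--     out = []
--     buf = None    # lines of the open code block (fence included), or None
--     btype = None  # 'footnote' / 'page' — type of the last marker seen
--     pend = None   # (block_lines, close_line, blank_lines) held after closing a footnote block
--     for line in markdown_text.split('\n'):
--         s = line.strip()
--         if pend is not None:
--             blk, close, blanks = pend
--             if s == '```footnote':
--                 # contiguous footnote block: merge, dropping fences and blanks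
--                 buf, btype, pend = blk, 'footnote', None
--                 continue
--             if s == '' and len(blanks) < 4:
--                 pend = (blk, close, blanks + [line])
--                 continue
--             # no merge: emit the held block, its fence and the buffered blanks,
--             # then handle this line normally (we are outside any block here)
--             out.extend(blk)
--             out.append(close)
--             out.extend(blanks)
--             pend = None
--             if s == '```footnote' or s == '```page':
--                 buf = [line]
--                 btype = 'footnote' if s == '```footnote' else 'page'
--             else:
--                 out.append(line)
--             continue
--         if buf is not None:
--             if s == '```footnote' or s == '```page':
--                 btype = 'footnote' if s == '```footnote' else 'page'
--             elif s == '```':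
--                 if btype == 'footnote':
--                     pend = (buf, line, [])
--                 else:
--                     out.extend(buf)
--                     out.append(line)
--                 buf = None
--             elif s:
--                 buf = buf + [line]
--         else:
--             if s == '```footnote' or s == '```page':
--                 buf = [line]
--                 btype = 'footnote' if s == '```footnote' else 'page'
--             else:
--                 out.append(line)
--     if pend is not None:
--         blk, close, blanks = pend
--         out.extend(blk)
--         out.append(close)
--         out.extend(blanks)
--     elif buf is not None:
--         out.extend(buf)
--     return '\n'.join(out)
-- ===== Notes on version B (the rewrite author's own statement) =====
-- stated objective: alternative
-- what changed: A is an index-driven while loop that, at each footnote-block close, re-scans a 5-line lookahead window and jumps the index to merge; B is a single forward pass with no indices and no lookahead: a three-state machine (outside / inside block / pending-after-footnote-close) that buffers the closed block plus up to 4 blank lines and merges or flushes when the next non-blank token arrives.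
import Mathlib
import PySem

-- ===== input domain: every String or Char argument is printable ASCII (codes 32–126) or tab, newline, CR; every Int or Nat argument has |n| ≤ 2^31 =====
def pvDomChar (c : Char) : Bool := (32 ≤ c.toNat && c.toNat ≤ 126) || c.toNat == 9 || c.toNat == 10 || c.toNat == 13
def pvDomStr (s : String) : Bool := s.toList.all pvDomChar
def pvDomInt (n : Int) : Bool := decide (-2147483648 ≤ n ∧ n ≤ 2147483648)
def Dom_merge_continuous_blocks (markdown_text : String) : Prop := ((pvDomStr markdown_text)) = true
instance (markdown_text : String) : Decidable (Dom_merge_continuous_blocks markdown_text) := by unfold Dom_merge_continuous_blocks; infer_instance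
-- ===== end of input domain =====

-- B replaces A's index loop with 5-line lookahead by a single forward pass that defers
-- flushing a closed footnote block (no speed claim: both are linear).

-- ===== PORT A =====

-- measure lemmas cited by the ports' `decreasing_by` (kept tiny so the fix terms stay small)
theorem pvDecStep (a b : Nat) (h : b < a) : a - (b + 1) < a - b := by omega
theorem pvDecJump (L i n : Nat) (hi : i < L) (hn : i + 1 ≤ n) : L - (n + 1) < L - i := by omega


-- the inner `while j < min(i + 6, len(lines))` lookahead loop of A
def scanA (lines : List String) (iEnd j empty : Nat) : Option Nat × Nat :=
  if j < min iEnd lines.length then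
    let s := PySem.Str.strip (lines.getD j "")
    if s == "```footnote" then (some j, empty)
    else if s == "" then scanA lines iEnd (j + 1) (empty + 1)
    else if s == "```page" then (none, empty)   -- break
    else (none, empty)                           -- break
  else (none, empty)
termination_by iEnd - j
decreasing_by exact pvDecStep iEnd j (Nat.lt_of_lt_of_le (by assumption : j < min iEnd lines.length) (Nat.min_le_left _ _))

theorem scanA_some_bounds (lines : List String) (iEnd j empty : Nat) (n e : Nat)
    (h : scanA lines iEnd j empty = (some n, e)) : j ≤ n ∧ n < lines.length := by
  rw [scanA] at h
  split at h
  · rename_i hlt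
    dsimp only at h
    split at h
    · cases h; omega
    · split at h
      · have := scanA_some_bounds lines iEnd (j + 1) (empty + 1) n e h
        omega
      · split at h <;> cases h
  · cases h
termination_by iEnd - j
decreasing_by omega

-- the outer `while i < len(lines)` loop of A
def loopA (lines : List String) (i : Nat) (result current : List String)
    (inB : Bool) (btype : Option String) : List String :=
  if h : i < lines.length then
    let line := lines.getD i ""
    let s := PySem.Str.strip line
    if s == "```footnote" || s == "```page" then
      let bt := some (if s == "```footnote" then "footnote" else "page")
      if !inB then loopA lines (i + 1) result [line] true bt
      else loopA lines (i + 1) result current inB bt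
    else if s == "```" then
      if inB then
        if btype == some "footnote" then
          match hscan : scanA lines (i + 6) (i + 1) 0 with
          | (some n, e) =>
            if e ≤ 4 then loopA lines (n + 1) result current inB btype
            else loopA lines (i + 1) (result ++ current ++ [line]) [] false btype
          | (none, _) => loopA lines (i + 1) (result ++ current ++ [line]) [] false btype
        else loopA lines (i + 1) (result ++ current ++ [line]) [] false btype
      else loopA lines (i + 1) (result ++ [line]) current inB btype
    else
      if inB then
        if s != "" then loopA lines (i + 1) result (current ++ [line]) inB btype
        else loopA lines (i + 1) result current inB btype
      else loopA lines (i + 1) (result ++ [line]) current inB btype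
  else result ++ current
termination_by lines.length - i
decreasing_by
  all_goals first
    | exact pvDecStep lines.length i h
    | exact pvDecJump lines.length i n h (scanA_some_bounds lines (i + 6) (i + 1) 0 n e hscan).1

def merge_continuous_blocks (markdown_text : String) : String :=
  PySem.Str.join "\n" (loopA ((PySem.Str.split? markdown_text "\n").getD []) 0 [] [] false none)

-- ===== PORT B =====

-- single forward pass; pend = (block lines, closing fence line, buffered blank lines)
def loopB : List String → List String → Option (List String) → Option String →
    Option (List String × String × List String) → List String
  | [], out, buf, _, pend =>
    match pend with
    | some (blk, close, blanks) => out ++ blk ++ [close] ++ blanks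
    | none =>
      match buf with
      | some b => out ++ b
      | none => out
  | line :: rest, out, buf, bt, pend =>
    let s := PySem.Str.strip line
    match pend with
    | some (blk, close, blanks) =>
      if s == "```footnote" then loopB rest out (some blk) (some "footnote") none
      else if s == "" && decide (blanks.length < 4) then
        loopB rest out buf bt (some (blk, close, blanks ++ [line]))
      else
        let out2 := out ++ blk ++ [close] ++ blanks
        if s == "```footnote" || s == "```page" then
          loopB rest out2 (some [line]) (some (if s == "```footnote" then "footnote" else "page")) none
        else loopB rest (out2 ++ [line]) none bt none
    | none =>
      match buf with
      | some b =>
        if s == "```footnote" || s == "```page" then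
          loopB rest out (some b) (some (if s == "```footnote" then "footnote" else "page")) none
        else if s == "```" then
          if bt == some "footnote" then loopB rest out none bt (some (b, line, []))
          else loopB rest (out ++ b ++ [line]) none bt none
        else if s != "" then loopB rest out (some (b ++ [line])) bt none
        else loopB rest out (some b) bt none
      | none =>
        if s == "```footnote" || s == "```page" then
          loopB rest out (some [line]) (some (if s == "```footnote" then "footnote" else "page")) none
        else loopB rest (out ++ [line]) none bt none

def merge_continuous_blocks_alt (markdown_text : String) : String :=
  PySem.Str.join "\n" (loopB ((PySem.Str.split? markdown_text "\n").getD []) [] none none none)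

-- ===== PRECONDITION & SPEC =====
def Spec_merge_continuous_blocks (markdown_text : String) (out : String) : Prop := out = merge_continuous_blocks_alt markdown_text
instance (markdown_text : String) (out : String) : Decidable (Spec_merge_continuous_blocks markdown_text out) := by unfold Spec_merge_continuous_blocks; infer_instance

-- ===== CLAIM (what is proved, stated in full; the proofs are below) =====
def Claim_equal_merge_continuous_blocks : Prop := ∀ (markdown_text : String), Dom_merge_continuous_blocks markdown_text → Spec_merge_continuous_blocks markdown_text (merge_continuous_blocks markdown_text)

-- ===== LEMMAS AND PROOFS =====

-- blank walk: A appends a run of blank lines one by one while out of a block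
theorem blankwalk (lines : List String) : ∀ (blanks : List String) (p : Nat) (O : List String) (bt : Option String),
    p + blanks.length ≤ lines.length →
    (∀ m, m < blanks.length → blanks.getD m "" = lines.getD (p + m) "" ∧
      PySem.Str.strip (lines.getD (p + m) "") = "") →
    loopA lines p O [] false bt = loopA lines (p + blanks.length) (O ++ blanks) [] false bt := by
  intro blanks
  induction blanks with
  | nil => intro p O bt _ _; simp
  | cons x xs ih =>
    intro p O bt hlen hbl
    have hp : p < lines.length := by simp at hlen; omega
    have h0 := hbl 0 (by simp)
    have hx : x = lines[p] := by
      simpa [List.getD_eq_getElem?_getD, List.getElem?_eq_getElem hp] using h0.1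
    have hs : PySem.Str.strip lines[p] = "" := by
      simpa [List.getD_eq_getElem?_getD, List.getElem?_eq_getElem hp] using h0.2
    rw [loopA.eq_def]
    simp only [hp, dif_pos, List.getD_eq_getElem?_getD, List.getElem?_eq_getElem hp, Option.getD_some, hs]
    norm_num
    have := ih (p + 1) (O ++ [x]) bt (by simp at hlen ⊢; omega) (by
      intro m hm
      have := hbl (m + 1) (by simp; omega)
      constructor
      · simpa [show p + 1 + m = p + (m + 1) by omega] using this.1
      · simpa [show p + 1 + m = p + (m + 1) by omega] using this.2)
    rw [hx] at this ⊢
    rw [this]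
    simp [show p + 1 + xs.length = p + (xs.length + 1) by omega]

-- pending walk: A's bounded lookahead at a footnote close agrees with B's deferred flush
theorem auxpend (lines : List String) (k : Nat)
    (ih : ∀ (i : Nat) (out cur : List String) (inB : Bool) (bt : Option String),
      lines.length - i ≤ k → (inB = false → cur = []) →
      loopA lines i out cur inB bt = loopB (lines.drop i) out (if inB then some cur else none) bt none)
    (i : Nat) (hi : i < lines.length) (hk : lines.length - (i + 1) ≤ k)
    (blanks : List String) (j : Nat) (out blk : List String) (close : String)
    (hj : j = i + 1 + blanks.length) (hb4 : blanks.length ≤ 4) (hjl : j ≤ lines.length)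
    (hbl : ∀ m, m < blanks.length → blanks.getD m "" = lines.getD (i + 1 + m) "" ∧
      PySem.Str.strip (lines.getD (i + 1 + m) "") = "") :
    (match scanA lines (i + 6) j blanks.length with
     | (some n, e) =>
        if e ≤ 4 then loopA lines (n + 1) out blk true (some "footnote")
        else loopA lines (i + 1) (out ++ blk ++ [close]) [] false (some "footnote")
     | (none, _) => loopA lines (i + 1) (out ++ blk ++ [close]) [] false (some "footnote"))
    = loopB (lines.drop j) out none (some "footnote") (some (blk, close, blanks)) := by
  have hflush : loopA lines (i + 1) (out ++ blk ++ [close]) [] false (some "footnote")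
      = loopA lines j (out ++ blk ++ [close] ++ blanks) [] false (some "footnote") := by
    have := blankwalk lines blanks (i + 1) (out ++ blk ++ [close]) (some "footnote")
      (by omega) (by intro m hm; exact hbl m hm)
    rw [this, hj]
  by_cases hjlen : j < lines.length
  · have hdrop : lines.drop j = lines[j] :: lines.drop (j + 1) := List.drop_eq_getElem_cons hjlen
    rw [hdrop, loopB]
    rw [scanA.eq_def]
    have hjwin : j < min (i + 6) lines.length := by omega
    simp only [hjwin, if_pos, List.getD_eq_getElem?_getD, List.getElem?_eq_getElem hjlen,
      Option.getD_some]
    by_cases hf : PySem.Str.strip lines[j] = "```footnote"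
    · simp only [hf]
      norm_num [hb4]
      simpa using ih (j + 1) out blk true (some "footnote") (by omega) (by simp)
    · by_cases hblank : PySem.Str.strip lines[j] = ""
      · by_cases hlt : blanks.length < 4
        · -- both consume one more blank line
          norm_num [hf, hblank, hlt]
          have hrec := auxpend lines k ih i hi hk (blanks ++ [lines[j]]) (j + 1) out blk close
            (by simp; omega) (by simp; omega) (by omega)
            (by
              intro m hm
              simp only [List.length_append, List.length_cons, List.length_nil] at hm
              rcases Nat.lt_or_ge m blanks.length with h' | h'
              · have := hbl m h'
                constructor
                · rw [← this.1]
                  simp [List.getD_eq_getElem?_getD, List.getElem?_append_left h']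
                · exact this.2
              · have hm' : m = blanks.length := by omega
                subst hm'
                have hij : i + 1 + blanks.length = j := by omega
                constructor
                · rw [hij]
                  simp [List.getD_eq_getElem?_getD, List.getElem?_eq_getElem hjlen]
                · rw [hij]
                  simpa [List.getD_eq_getElem?_getD, List.getElem?_eq_getElem hjlen] using hblank)
          simpa using hrec
        · -- 4 blanks already buffered and a 5th blank: both flush
          have hb4' : blanks.length = 4 := by omega
          norm_num [hf, hblank, hlt]
          simp only [show (("```footnote" : String) = "") = False by simp,
            show (("```page" : String) = "") = False by simp, if_false, or_self, if_neg]
          rw [scanA.eq_def]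
          simp only [show ¬(j + 1 < min (i + 6) lines.length) by omega, if_neg, if_false]
          simp only [← List.append_assoc]
          rw [hflush]
          rw [loopA.eq_def]
          simp only [hjlen, dif_pos, List.getD_eq_getElem?_getD, List.getElem?_eq_getElem hjlen,
            Option.getD_some, hblank]
          have := ih (j + 1) (out ++ blk ++ [close] ++ blanks ++ [lines[j]]) [] false
            (some "footnote") (by omega) (fun _ => rfl)
          simp only [Bool.false_eq_true, if_false] at this
          simp
          simpa using this
      · -- non-blank, non-footnote token: no merge, both flush
        simp only [beq_iff_eq, hf, hblank, decide_false, Bool.false_and, Bool.and_false,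
          if_false, ite_self, decide_eq_true_eq, Bool.false_eq_true]
        rw [hflush]
        rw [loopA.eq_def]
        simp only [hjlen, dif_pos, List.getD_eq_getElem?_getD, List.getElem?_eq_getElem hjlen,
          Option.getD_some]
        by_cases hp : PySem.Str.strip lines[j] = "```page"
        · simp only [hp, String.reduceEq, beq_iff_eq, or_true, if_true, or_false, if_false,
            Bool.not_false, reduceIte]
          norm_num
          simpa using ih (j + 1) (out ++ blk ++ [close] ++ blanks) [lines[j]] true (some "page")
            (by omega) (by simp)
        · have hcond : ¬ (PySem.Str.strip lines[j] = "```footnote" ∨ PySem.Str.strip lines[j] = "```page") :=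
            fun hor => hor.elim hf hp
          norm_num [hblank]
          rw [if_neg hcond, if_neg hcond]
          simpa using ih (j + 1) (out ++ blk ++ [close] ++ blanks ++ [lines[j]]) [] false
            (some "footnote") (by omega) (fun _ => rfl)
  · -- j = lines.length: end of input while pending — both flush
    have hje : j = lines.length := by omega
    have hdrop : lines.drop j = [] := by simp [hje]
    rw [hdrop, loopB]
    rw [scanA.eq_def]
    simp only [show ¬(j < min (i + 6) lines.length) by omega, if_false, Bool.false_eq_true]
    rw [hflush]
    rw [loopA.eq_def]
    simp [show ¬(j < lines.length) by omega]
termination_by 5 - blanks.length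
decreasing_by simp; omega

theorem sim (lines : List String) : ∀ (k i : Nat) (out cur : List String) (inB : Bool)
    (bt : Option String), lines.length - i ≤ k → (inB = false → cur = []) →
    loopA lines i out cur inB bt =
      loopB (lines.drop i) out (if inB then some cur else none) bt none := by
  intro k
  induction k with
  | zero =>
    intro i out cur inB bt hk hinv
    have h : ¬ i < lines.length := by omega
    have hdrop : lines.drop i = [] := by simp; omega
    rw [loopA.eq_def, hdrop]; simp only [loopB]
    cases inB
    · simp [h, hinv rfl]
    · simp [h]
  | succ k ih =>
    intro i out cur inB bt hk hinv
    by_cases h : i < lines.length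
    · have hdrop : lines.drop i = lines[i] :: lines.drop (i + 1) := List.drop_eq_getElem_cons h
      rw [hdrop]; simp only [loopB]; rw [loopA.eq_def]
      simp only [h, dif_pos, List.getD_eq_getElem?_getD, List.getElem?_eq_getElem h,
        Option.getD_some]
      by_cases hf : PySem.Str.strip lines[i] = "```footnote"
      · cases inB
        · have hcur := hinv rfl; subst hcur
          simp only [hf, String.reduceEq]
          norm_num
          simpa using ih (i + 1) out [lines[i]] true (some "footnote") (by omega) (by simp)
        · simp only [hf, String.reduceEq]
          norm_num
          simpa using ih (i + 1) out cur true (some "footnote") (by omega) (by simp)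
      · by_cases hp : PySem.Str.strip lines[i] = "```page"
        · cases inB
          · have hcur := hinv rfl; subst hcur
            simp only [hp, hf, String.reduceEq]
            norm_num
            simpa using ih (i + 1) out [lines[i]] true (some "page") (by omega) (by simp)
          · simp only [hp, hf, String.reduceEq]
            norm_num
            simpa using ih (i + 1) out cur true (some "page") (by omega) (by simp)
        · have hcond : ¬ (PySem.Str.strip lines[i] = "```footnote" ∨ PySem.Str.strip lines[i] = "```page") :=
            fun hor => hor.elim hf hp
          by_cases hc : PySem.Str.strip lines[i] = "```"
          · cases inB
            · have hcur := hinv rfl; subst hcur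
              norm_num [hf, hp, hc]
              simpa using ih (i + 1) (out ++ [lines[i]]) [] false bt (by omega) (fun _ => rfl)
            · by_cases hbt : bt = some "footnote"
              · subst hbt
                norm_num [hf, hp, hc]
                have := auxpend lines k ih i h (by omega) [] (i + 1) out cur lines[i]
                  (by simp) (by simp) (by omega) (by simp)
                simp only [List.length_nil] at this
                rcases hv : scanA lines (i + 6) (i + 1) 0 with ⟨_ | n, e⟩ <;>
                  rw [hv] at this <;> simpa using this
              · have hbt' : (bt == some "footnote") = false := by
                  simpa using hbt
                norm_num [hf, hp, hc, hbt']
                simpa using ih (i + 1) (out ++ cur ++ [lines[i]]) [] false bt (by omega) (fun _ => rfl)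
          · by_cases hb : PySem.Str.strip lines[i] = ""
            · cases inB
              · have hcur := hinv rfl; subst hcur
                norm_num [hf, hp, hc, hb]
                simpa using ih (i + 1) (out ++ [lines[i]]) [] false bt (by omega) (fun _ => rfl)
              · norm_num [hf, hp, hc, hb]
                simpa using ih (i + 1) out cur true bt (by omega) (by simp)
            · cases inB
              · have hcur := hinv rfl; subst hcur
                norm_num [hf, hp, hc, hb]
                simpa using ih (i + 1) (out ++ [lines[i]]) [] false bt (by omega) (fun _ => rfl)
              · norm_num [hf, hp, hc, hb]
                simpa using ih (i + 1) out (cur ++ [lines[i]]) true bt (by omega) (by simp)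
    · have hdrop : lines.drop i = [] := by simp; omega
      rw [loopA.eq_def, hdrop]; simp only [loopB]
      cases inB
      · simp [h, hinv rfl]
      · simp [h]

-- ===== VERDICT (by name: the statement is the Claim_ definition above) =====
theorem merge_continuous_blocks_spec : Claim_equal_merge_continuous_blocks := by
  intro t _
  unfold Spec_merge_continuous_blocks merge_continuous_blocks merge_continuous_blocks_alt
  rw [sim ((PySem.Str.split? t "\n").getD []) ((PySem.Str.split? t "\n").getD []).length 0
      [] [] false none (by omega) (fun _ => rfl)]
  rfl
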